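-- pv_equiv track=rewrite | github.com/Mort-Emki/src_PGRWQ | flow_routing_modules/core/topology.py | calculate_drainage_area
-- ===== SOURCE A (Python) =====
-- def calculate_drainage_area(next_down_ids, area_dict):
--     """
--     计算每个河段的汇水面积
--
--     参数:
--         next_down_ids: 下游河段映射字典
--         area_dict: 每个河段的本地汇水面积字典
--
--     返回:
--         dict: 累积汇水面积字典
--     """
--     # 创建上游映射
--     upstream_map = {}
--     for comid, next_down in next_down_ids.items():
--         if next_down == 0:
--             continue
--         if next_down not in upstream_map:
--             upstream_map[next_down] = []
--         upstream_map[next_down].append(comid)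
--
--     # 累积汇水面积字典
--     cumulative_area = {}
--
--     # 递归计算累积汇水面积
--     def calculate_area(comid):
--         # 如果已经计算过，直接返回
--         if comid in cumulative_area:
--             return cumulative_area[comid]
--
--         # 本地汇水面积
--         local_area = area_dict.get(comid, 0)
--
--         # 如果没有上游，只返回本地面积
--         if comid not in upstream_map:
--             cumulative_area[comid] = local_area
--             return local_area
--
--         # 计算所有上游的累积面积
--         upstream_area = sum(calculate_area(up) for up in upstream_map[comid])
--
--         # 本地面积加上游面积
--         total_area = local_area + upstream_area
--         cumulative_area[comid] = total_area
--
--         return total_area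
--
--     # 计算每个河段的累积面积
--     for comid in next_down_ids:
--         if comid not in cumulative_area:
--             calculate_area(comid)
--
--     return cumulative_area
-- ===== SOURCE B (Python) =====
-- def calculate_drainage_area(next_down_ids, area_dict):
--     """Iterative re-implementation: the recursive memoized DFS is replaced by an
--     explicit call stack of (node, remaining upstream ids, partial upstream sum)
--     frames, producing the same memoisation (insertion) order without Python
--     recursion.  Each frame's remaining-upstreams list is kept reversed so the
--     next upstream (in original order) is removed by an O(1) pop() from the end."""
--     upstream_map = {}
--     for comid, next_down in next_down_ids.items():
--         if next_down == 0:
--             continue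
--         upstream_map.setdefault(next_down, []).append(comid)
--
--     cumulative_area = {}
--     for start in next_down_ids:
--         if start in cumulative_area:
--             continue
--         stack = [(start, list(reversed(upstream_map.get(start, []))), 0)]
--         while stack:
--             node, remaining, acc = stack.pop()
--             if not remaining:
--                 total = area_dict.get(node, 0) + acc
--                 cumulative_area[node] = total
--                 if stack:
--                     pnode, prem, pacc = stack.pop()
--                     stack.append((pnode, prem, pacc + total))
--             else:
--                 u = remaining.pop()
--                 if u in cumulative_area:
--                     stack.append((node, remaining, acc + cumulative_area[u]))
--                 else:
--                     stack.append((node, remaining, acc))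
--                     stack.append((u, list(reversed(upstream_map.get(u, []))), 0))
--     return cumulative_area
-- ===== Notes on version B (the rewrite author's own statement) =====
-- stated objective: alternative
-- what changed: The recursive memoized DFS over the upstream map is replaced by an iterative explicit stack of (node, remaining-upstreams, partial-sum) call frames, producing the same cumulative areas in the same insertion order without Python recursion.
import Mathlib
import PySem

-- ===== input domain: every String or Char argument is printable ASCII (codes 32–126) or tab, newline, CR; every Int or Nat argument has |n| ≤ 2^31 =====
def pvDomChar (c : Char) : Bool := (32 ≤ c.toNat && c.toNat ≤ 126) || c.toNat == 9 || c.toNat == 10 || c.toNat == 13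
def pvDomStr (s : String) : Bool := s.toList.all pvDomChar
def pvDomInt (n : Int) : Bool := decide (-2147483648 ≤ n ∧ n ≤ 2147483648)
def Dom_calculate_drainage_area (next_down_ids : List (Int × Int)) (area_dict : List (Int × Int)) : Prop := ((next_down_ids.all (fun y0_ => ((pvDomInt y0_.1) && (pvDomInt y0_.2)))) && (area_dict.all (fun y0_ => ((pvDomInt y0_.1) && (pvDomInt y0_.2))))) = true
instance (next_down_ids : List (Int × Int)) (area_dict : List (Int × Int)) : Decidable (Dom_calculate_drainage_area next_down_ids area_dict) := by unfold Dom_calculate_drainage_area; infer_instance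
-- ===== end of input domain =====

-- B replaces A's recursive memoized DFS by an explicit stack of call frames (same
-- return value and insertion order, no Python recursion); objective: alternative.

-- ===== PORT A =====
-- upstream_map build loop of A (if next_down not in map: map[next_down] = []; append)
def buildUpA (d : PySem.Dict Int Int) : PySem.Dict Int (List Int) :=
  d.items.foldl (fun um p =>
    if p.2 = 0 then um
    else ((if um.contains p.2 then um else um.insert p.2 ([] : List Int)).modify p.2 [] (· ++ [p.1])))
    PySem.Dict.empty

mutual
-- calculate_area: the fuel only makes the recursion structural; it is seeded above the
-- longest possible acyclic chain, so inside Pre_ (acyclic input) it is never exhausted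
def calcA (um : PySem.Dict Int (List Int)) (ad : PySem.Dict Int Int) :
    Nat → Int → PySem.Dict Int Int → PySem.Dict Int Int × Option Int
  | g, c, m =>
    match m.get? c with
    | some v => (m, some v)
    | none =>
      match g with
      | 0 => (m, none)
      | Nat.succ g' =>
        match calcAUps um ad g' (um.getD c []) m with
        | (m', none) => (m', none)
        | (m', some s) =>
          let v := ad.getD c 0 + s
          (m'.insert c v, some v)
termination_by g c m => (g, 0)

-- sum(calculate_area(up) for up in upstream_map[comid])
def calcAUps (um : PySem.Dict Int (List Int)) (ad : PySem.Dict Int Int) :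
    Nat → List Int → PySem.Dict Int Int → PySem.Dict Int Int × Option Int
  | _, [], m => (m, some 0)
  | g, u :: us, m =>
    match calcA um ad g u m with
    | (m', none) => (m', none)
    | (m', some v) =>
      match calcAUps um ad g us m' with
      | (m'', none) => (m'', none)
      | (m'', some s) => (m'', some (v + s))
termination_by g us m => (g, us.length + 1)
end

-- for comid in next_down_ids: if comid not in cumulative_area: calculate_area(comid)
def loopA (um : PySem.Dict Int (List Int)) (ad : PySem.Dict Int Int) (F : Nat) :
    List Int → PySem.Dict Int Int → PySem.Dict Int Int
  | [], m => m
  | c :: ks, m =>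
    if m.contains c then loopA um ad F ks m
    else
      match calcA um ad F c m with
      | (m', some _) => loopA um ad F ks m'
      | (m', none) => m'   -- fuel exhausted: only on cyclic input, outside Pre_

def calculate_drainage_area (next_down_ids : List (Int × Int)) (area_dict : List (Int × Int)) : List (Int × Int) :=
  let d := PySem.Dict.ofList next_down_ids
  (loopA (buildUpA d) (PySem.Dict.ofList area_dict) (d.keys.length + 2) d.keys PySem.Dict.empty).items

-- ===== PORT B =====
-- upstream_map build loop of B (setdefault(next_down, []).append(comid))
def buildUpB (d : PySem.Dict Int Int) : PySem.Dict Int (List Int) :=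
  d.items.foldl (fun um p =>
    if p.2 = 0 then um
    else (um.setdefault p.2 ([] : List Int)).modify p.2 [] (· ++ [p.1]))
    PySem.Dict.empty

-- termination bookkeeping for the stack machine (not part of Source B's logic)
def upsBound (um : PySem.Dict Int (List Int)) : Nat :=
  um.items.foldl (fun n p => max n p.2.length) 0

theorem foldl_max_le_start : ∀ (t : List (Int × List Int)) (n : Nat),
    n ≤ t.foldl (fun n q => max n q.2.length) n := by
  intro t
  induction t with
  | nil => simp
  | cons r t ih => exact fun n => le_trans (le_max_left _ _) (ih _)

theorem foldl_max_len_le {l : List (Int × List Int)} {p : Int × List Int} (hp : p ∈ l) :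
    ∀ n, p.2.length ≤ l.foldl (fun n q => max n q.2.length) n := by
  induction l with
  | nil => cases hp
  | cons q t ih =>
    intro n
    cases hp with
    | head => exact le_trans (le_max_right _ _) (foldl_max_le_start _ _)
    | tail _ hp => exact ih hp _

theorem len_getD_le_upsBound (um : PySem.Dict Int (List Int)) (u : Int) :
    (um.getD u []).length ≤ upsBound um := by
  cases h : um.get? u with
  | none => simp [PySem.Dict.getD_eq_get?_getD, h]
  | some v =>
    have hm : (u, v) ∈ um.items := PySem.Dict.mem_items_of_get?_eq_some um h
    have := foldl_max_len_le (l := um.items) (p := (u, v)) hm 0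
    simp only [PySem.Dict.getD_eq_get?_getD, h, Option.getD_some]
    exact this

-- the explicit while-loop over the frame stack; frame = (fuel, node, remaining, acc);
-- Source B keeps `remaining` reversed and pops its LAST element; the Lean list holds the same
-- elements in consumption order and is consumed from the front — identical value sequence;
-- the fuel component only makes the loop structural and is seeded above the longest
-- acyclic chain, so inside Pre_ it is never exhausted
def runB (um : PySem.Dict Int (List Int)) (ad : PySem.Dict Int Int) :
    List (Nat × Int × List Int × Int) → PySem.Dict Int Int → PySem.Dict Int Int
  | [], m => m
  | (g, c, rem, a) :: rest, m =>
    match rem with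
    | [] =>
      let v := ad.getD c 0 + a
      match rest with
      | [] => m.insert c v
      | (g', c', rem', a') :: r => runB um ad ((g', c', rem', a' + v) :: r) (m.insert c v)
    | u :: rem' =>
      match m.get? u with
      | some w => runB um ad ((g, c, rem', a + w) :: rest) m
      | none =>
        match g with
        | 0 => m
        | Nat.succ g' => runB um ad ((g', u, um.getD u [], 0) :: (Nat.succ g', c, rem', a) :: rest) m
termination_by st m => (st.map (fun f => (upsBound um + 2) ^ f.1 * (1 + f.2.2.1.length))).sum
decreasing_by
  · simp only [List.map_cons, List.sum_cons, List.length_nil]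
    have h1 : 0 < (upsBound um + 2) ^ g := Nat.pow_pos (by omega)
    omega
  · simp only [List.map_cons, List.sum_cons, List.length_cons]
    have h1 : 0 < (upsBound um + 2) ^ g := Nat.pow_pos (by omega)
    have h2 : (upsBound um + 2) ^ g * (1 + rem'.length) < (upsBound um + 2) ^ g * (1 + (rem'.length + 1)) :=
      mul_lt_mul_of_pos_left (by omega) h1
    omega
  · simp only [List.map_cons, List.sum_cons, List.length_cons, Nat.succ_eq_add_one]
    have h1 : 0 < (upsBound um + 2) ^ g' := Nat.pow_pos (by omega)
    have hL := len_getD_le_upsBound um u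
    have h2 : (upsBound um + 2) ^ g' * (1 + (um.getD u []).length) < (upsBound um + 2) ^ (g' + 1) := by
      rw [pow_succ]
      exact lt_of_le_of_lt
        (mul_le_mul_left' (show 1 + (um.getD u []).length ≤ upsBound um + 1 by omega) _)
        (mul_lt_mul_of_pos_left (by omega) h1)
    have h3 : (upsBound um + 2) ^ (g' + 1) + (upsBound um + 2) ^ (g' + 1) * (1 + rem'.length)
        = (upsBound um + 2) ^ (g' + 1) * (1 + (rem'.length + 1)) := by ring
    omega

-- for start in next_down_ids: if start in cumulative_area: continue; run the stack
def loopB (um : PySem.Dict Int (List Int)) (ad : PySem.Dict Int Int) (F : Nat) :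
    List Int → PySem.Dict Int Int → PySem.Dict Int Int
  | [], m => m
  | c :: ks, m =>
    if m.contains c then loopB um ad F ks m
    else loopB um ad F ks (runB um ad [(F, c, um.getD c [], 0)] m)

def calculate_drainage_area_alt (next_down_ids : List (Int × Int)) (area_dict : List (Int × Int)) : List (Int × Int) :=
  let d := PySem.Dict.ofList next_down_ids
  (loopB (buildUpB d) (PySem.Dict.ofList area_dict) (d.keys.length + 1) d.keys PySem.Dict.empty).items

-- ===== PRECONDITION & SPEC =====
-- exitsD d k c: following next-down links from c leaves the key set (or reaches 0) within k steps
def exitsD (d : PySem.Dict Int Int) : Nat → Int → Bool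
  | 0, _ => false
  | Nat.succ k, c =>
    match d.get? c with
    | none => true
    | some nd => if nd = 0 then true else exitsD d k nd

-- Pre_ excludes exactly the CYCLIC inputs — those whose next-down chain from some key never
-- leaves the key set (within len(keys)+1 steps, which every acyclic chain satisfies):
-- there A's recursion raises RecursionError and B's stack loop does not terminate.
def Pre_calculate_drainage_area (next_down_ids : List (Int × Int)) (area_dict : List (Int × Int)) : Prop :=
  ((PySem.Dict.ofList next_down_ids).keys.all
    (fun c => exitsD (PySem.Dict.ofList next_down_ids)
      ((PySem.Dict.ofList next_down_ids).keys.length + 1) c)) = true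

instance (next_down_ids : List (Int × Int)) (area_dict : List (Int × Int)) : Decidable (Pre_calculate_drainage_area next_down_ids area_dict) := by unfold Pre_calculate_drainage_area; infer_instance

def pvWitness_calculate_drainage_area : (List (Int × Int)) × (List (Int × Int)) :=
  ([(1, 2), (2, 3), (3, 0)], [(1, 10), (2, 5), (3, 1)])

def Spec_calculate_drainage_area (next_down_ids : List (Int × Int)) (area_dict : List (Int × Int)) (out : List (Int × Int)) : Prop := out = calculate_drainage_area_alt next_down_ids area_dict
instance (next_down_ids : List (Int × Int)) (area_dict : List (Int × Int)) (out : List (Int × Int)) : Decidable (Spec_calculate_drainage_area next_down_ids area_dict out) := by unfold Spec_calculate_drainage_area; infer_instance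

-- ===== CLAIM (what is proved, stated in full; the proofs are below) =====
def Claim_equal_calculate_drainage_area : Prop := ∀ (next_down_ids : List (Int × Int)) (area_dict : List (Int × Int)), Dom_calculate_drainage_area next_down_ids area_dict → Pre_calculate_drainage_area next_down_ids area_dict → Spec_calculate_drainage_area next_down_ids area_dict (calculate_drainage_area next_down_ids area_dict)

-- ===== LEMMAS AND PROOFS =====

-- step lemmas for the two ports' recursions
theorem calcA_memo (um : PySem.Dict Int (List Int)) (ad : PySem.Dict Int Int) (g : Nat)
    (c : Int) (m : PySem.Dict Int Int) {v : Int} (h : m.get? c = some v) :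
    calcA um ad g c m = (m, some v) := by
  simp only [calcA.eq_def, h]

theorem calcA_zero (um : PySem.Dict Int (List Int)) (ad : PySem.Dict Int Int)
    (c : Int) (m : PySem.Dict Int Int) (h : m.get? c = none) :
    calcA um ad 0 c m = (m, none) := by
  simp only [calcA.eq_def, h]

theorem calcA_succ (um : PySem.Dict Int (List Int)) (ad : PySem.Dict Int Int) (g' : Nat)
    (c : Int) (m : PySem.Dict Int Int) (h : m.get? c = none) :
    calcA um ad (g' + 1) c m =
      (match calcAUps um ad g' (um.getD c []) m with
       | (m', none) => (m', none)
       | (m', some s) => (m'.insert c (ad.getD c 0 + s), some (ad.getD c 0 + s))) := by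
  simp only [calcA.eq_def, h]

theorem calcAUps_nil (um : PySem.Dict Int (List Int)) (ad : PySem.Dict Int Int) (g : Nat)
    (m : PySem.Dict Int Int) : calcAUps um ad g [] m = (m, some 0) := by
  conv_lhs => rw [calcAUps.eq_def]

theorem calcAUps_cons (um : PySem.Dict Int (List Int)) (ad : PySem.Dict Int Int) (g : Nat)
    (u : Int) (us : List Int) (m : PySem.Dict Int Int) :
    calcAUps um ad g (u :: us) m =
      (match calcA um ad g u m with
       | (m', none) => (m', none)
       | (m', some v) =>
         match calcAUps um ad g us m' with
         | (m'', none) => (m'', none)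
         | (m'', some s) => (m'', some (v + s))) := by
  conv_lhs => rw [calcAUps.eq_def]

theorem runB_done_nil (um : PySem.Dict Int (List Int)) (ad : PySem.Dict Int Int)
    (g : Nat) (c a : Int) (m : PySem.Dict Int Int) :
    runB um ad [(g, c, [], a)] m = m.insert c (ad.getD c 0 + a) := by
  conv_lhs => rw [runB.eq_def]

theorem runB_done_cons (um : PySem.Dict Int (List Int)) (ad : PySem.Dict Int Int)
    (g g' : Nat) (c c' a a' : Int) (rem' : List Int) (r : List (Nat × Int × List Int × Int))
    (m : PySem.Dict Int Int) :
    runB um ad ((g, c, [], a) :: (g', c', rem', a') :: r) m =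
      runB um ad ((g', c', rem', a' + (ad.getD c 0 + a)) :: r) (m.insert c (ad.getD c 0 + a)) := by
  conv_lhs => rw [runB.eq_def]

theorem runB_memo (um : PySem.Dict Int (List Int)) (ad : PySem.Dict Int Int)
    (g : Nat) (c a : Int) (u : Int) (rem' : List Int)
    (rest : List (Nat × Int × List Int × Int)) (m : PySem.Dict Int Int) {w : Int}
    (h : m.get? u = some w) :
    runB um ad ((g, c, u :: rem', a) :: rest) m =
      runB um ad ((g, c, rem', a + w) :: rest) m := by
  conv_lhs => rw [runB.eq_def]
  dsimp only
  rw [h]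

theorem runB_zero (um : PySem.Dict Int (List Int)) (ad : PySem.Dict Int Int)
    (c a : Int) (u : Int) (rem' : List Int)
    (rest : List (Nat × Int × List Int × Int)) (m : PySem.Dict Int Int)
    (h : m.get? u = none) :
    runB um ad ((0, c, u :: rem', a) :: rest) m = m := by
  conv_lhs => rw [runB.eq_def]
  dsimp only
  rw [h]

theorem runB_push (um : PySem.Dict Int (List Int)) (ad : PySem.Dict Int Int)
    (g' : Nat) (c a : Int) (u : Int) (rem' : List Int)
    (rest : List (Nat × Int × List Int × Int)) (m : PySem.Dict Int Int)
    (h : m.get? u = none) :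
    runB um ad ((g' + 1, c, u :: rem', a) :: rest) m =
      runB um ad ((g', u, um.getD u [], 0) :: (g' + 1, c, rem', a) :: rest) m := by
  conv_lhs => rw [runB.eq_def]
  dsimp only
  rw [h]

-- the two upstream-map build loops are the same function
theorem buildUp_eq (d : PySem.Dict Int Int) : buildUpA d = buildUpB d := by
  unfold buildUpA buildUpB
  congr 1
  funext um p
  by_cases h : p.2 = 0
  · simp [h]
  · rw [if_neg h, if_neg h]
    by_cases hc : um.contains p.2 = true
    · rw [PySem.Dict.setdefault_of_contains um ([] : List Int) hc, if_pos hc]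
    · rw [PySem.Dict.setdefault_of_not_contains um ([] : List Int)
        (by revert hc; cases um.contains p.2 <;> simp), if_neg hc]

-- characterisation of the upstream map built by A's loop
theorem getD_buildFold :
    ∀ (l : List (Int × Int)) (um : PySem.Dict Int (List Int)) (x : Int),
    ((l.foldl (fun um p =>
        if p.2 = 0 then um
        else ((if um.contains p.2 then um else um.insert p.2 ([] : List Int)).modify p.2 [] (· ++ [p.1])))
      um).getD x [])
      = um.getD x [] ++ (l.filter (fun p => p.2 == x && !(p.2 == 0))).map (·.1) := by
  intro l
  induction l with
  | nil => simp
  | cons p t ih =>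
    intro um x
    simp only [List.foldl_cons, List.filter_cons]
    by_cases h0 : p.2 = 0
    · simp [h0, ih]
    · have hbase : ∀ y : Int,
          ((if um.contains p.2 = true then um else um.insert p.2 ([] : List Int)).getD y [])
            = um.getD y [] := by
        intro y
        by_cases hcon : um.contains p.2 = true
        · rw [if_pos hcon]
        · have hconf : um.contains p.2 = false := by
            revert hcon; cases um.contains p.2 <;> simp
          rw [if_neg hcon, PySem.Dict.getD_insert]
          by_cases hy : y = p.2
          · rw [if_pos hy, hy]
            exact (PySem.Dict.getD_of_not_contains um ([] : List Int) hconf).symm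
          · rw [if_neg hy]
      have hstep :
          ((if p.2 = 0 then um
            else ((if um.contains p.2 then um else um.insert p.2 ([] : List Int)).modify p.2 [] (· ++ [p.1]))).getD x [])
          = um.getD x [] ++ (if p.2 = x then [p.1] else []) := by
        rw [if_neg h0, PySem.Dict.getD_modify]
        by_cases hx : x = p.2
        · rw [if_pos hx, hbase, if_pos hx.symm, hx]
        · rw [if_neg hx, if_neg (fun hh : p.2 = x => hx hh.symm), hbase, List.append_nil]
      rw [ih, hstep]
      by_cases hx : p.2 = x
      · subst hx
        simp [h0, List.append_assoc]
      · simp [hx, h0]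

theorem mem_ups_buildUpA (d : PySem.Dict Int Int) (x u : Int)
    (hu : u ∈ (buildUpA d).getD x []) : (u, x) ∈ d.items ∧ x ≠ 0 := by
  unfold buildUpA at hu
  rw [getD_buildFold] at hu
  simp only [PySem.Dict.getD_empty, List.nil_append, List.mem_map, List.mem_filter] at hu
  obtain ⟨p, ⟨hmem, hcond⟩, hfst⟩ := hu
  simp only [Bool.and_eq_true, beq_iff_eq, Bool.not_eq_true', beq_eq_false_iff_ne] at hcond
  obtain ⟨hx, h0⟩ := hcond
  have hp : p = (u, x) := by
    obtain ⟨p1, p2⟩ := p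
    simp only at hfst hx
    rw [hfst, hx]
  rw [hp] at hmem
  rw [hx] at h0
  exact ⟨hmem, h0⟩

-- fuel-sufficiency: inside Pre_, A's recursion never exhausts its fuel
theorem calcAUps_some (um : PySem.Dict Int (List Int)) (ad : PySem.Dict Int Int) (g : Nat)
    (us : List Int) (h : ∀ u ∈ us, ∀ m, ((calcA um ad g u m).2).isSome) :
    ∀ m, ((calcAUps um ad g us m).2).isSome := by
  induction us with
  | nil => intro m; rw [calcAUps_nil]; simp
  | cons u t ih =>
    intro m
    rw [calcAUps_cons]
    have h1 := h u (by simp) m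
    rcases hr : calcA um ad g u m with ⟨m', r⟩
    rw [hr] at h1
    cases r with
    | none => simp at h1
    | some v =>
      have h2 := ih (fun u hu m => h u (by simp [hu]) m) m'
      rcases hr2 : calcAUps um ad g t m' with ⟨m'', r2⟩
      rw [hr2] at h2
      cases r2 with
      | none => simp at h2
      | some s => simp [hr2]

theorem calcA_some (d : PySem.Dict Int Int) (ad : PySem.Dict Int Int) (N : Nat)
    (hP : ∀ c ∈ d.keys, exitsD d N c = true) (hnd : d.keys.Nodup) :
    ∀ g c m, c ∈ d.keys → (g ≤ N → exitsD d (N - g) c = false) →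
    ((calcA (buildUpA d) ad g c m).2).isSome := by
  intro g
  induction g using Nat.strong_induction_on with
  | _ g IH =>
    intro c m hc hg
    cases hm : m.get? c with
    | some v => rw [calcA_memo _ _ _ _ _ hm]; simp
    | none =>
      cases g with
      | zero =>
        exfalso
        have := hg (by omega)
        rw [Nat.sub_zero, hP c hc] at this
        simp at this
      | succ g' =>
        have hups : ∀ u ∈ (buildUpA d).getD c [], ∀ m',
            ((calcA (buildUpA d) ad g' u m').2).isSome := by
          intro u hu m'
          obtain ⟨hmem, hx0⟩ := mem_ups_buildUpA d c u hu
          have hukey : u ∈ d.keys := PySem.Dict.mem_keys_of_mem_items d hmem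
          have hget : d.get? u = some c := PySem.Dict.get?_of_mem_items d hmem hnd
          apply IH g' (by omega) u m' hukey
          intro hg'
          cases Nat.lt_or_ge g' N with
          | inr hge =>
            have : g' = N := by omega
            subst this
            simp [exitsD]
          | inl hlt =>
            have hgs : N - g' = (N - (g' + 1)) + 1 := by omega
            rw [hgs]
            have hrest := hg (by omega)
            simp only [exitsD, hget]
            rw [if_neg hx0]
            exact hrest
        have h2 := calcAUps_some (buildUpA d) ad g' ((buildUpA d).getD c []) hups m
        rw [calcA_succ _ _ _ _ _ hm]
        rcases hr : calcAUps (buildUpA d) ad g' ((buildUpA d).getD c []) m with ⟨m', r⟩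
        rw [hr] at h2
        cases r with
        | none => simp at h2
        | some s => simp

-- the stack machine simulates A's recursion frame by frame
theorem runB_frame (um : PySem.Dict Int (List Int)) (ad : PySem.Dict Int Int) :
    ∀ g : Nat, ∀ ups : List Int, ∀ (c : Int) (rest : List (Nat × Int × List Int × Int)) (a : Int) (m : PySem.Dict Int Int),
    runB um ad ((g, c, ups, a) :: rest) m =
      match calcAUps um ad g ups m with
      | (m', none) => m'
      | (m', some s) =>
        match rest with
        | [] => m'.insert c (ad.getD c 0 + (a + s))
        | (g', c', rem', a') :: r =>
            runB um ad ((g', c', rem', a' + (ad.getD c 0 + (a + s))) :: r)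
              (m'.insert c (ad.getD c 0 + (a + s))) := by
  intro g
  induction g using Nat.strong_induction_on with
  | _ g IHg =>
    intro ups
    induction ups with
    | nil =>
      intro c rest a m
      rw [calcAUps_nil]
      cases rest with
      | nil => rw [runB_done_nil]; simp
      | cons f r =>
        rcases f with ⟨g', c', rem', a'⟩
        rw [runB_done_cons]
        simp
    | cons u us ihus =>
      intro c rest a m
      cases hm : m.get? u with
      | some w =>
        rw [runB_memo _ _ _ _ _ _ _ _ _ hm]
        rw [ihus c rest (a + w) m]
        rw [calcAUps_cons, calcA_memo _ _ _ _ _ hm]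
        simp only []
        rcases hr : calcAUps um ad g us m with ⟨m'', r2⟩
        cases r2 with
        | none => simp
        | some s =>
          have hass : a + w + s = a + (w + s) := by ring
          simp only [hass]
      | none =>
        cases g with
        | zero =>
          rw [runB_zero _ _ _ _ _ _ _ _ hm]
          rw [calcAUps_cons, calcA_zero _ _ _ _ hm]
        | succ g0 =>
          rw [runB_push _ _ _ _ _ _ _ _ _ hm]
          rw [IHg g0 (by omega) (um.getD u []) u ((g0 + 1, c, us, a) :: rest) 0 m]
          rw [calcAUps_cons, calcA_succ _ _ _ _ _ hm]
          rcases hr : calcAUps um ad g0 (um.getD u []) m with ⟨mu, ru⟩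
          cases ru with
          | none => simp
          | some su =>
            simp only [Int.zero_add]
            rw [ihus c rest (a + (ad.getD u 0 + su)) (mu.insert u (ad.getD u 0 + su))]
            rcases hr2 : calcAUps um ad (g0 + 1) us (mu.insert u (ad.getD u 0 + su)) with ⟨m2, r2⟩
            cases r2 with
            | none => simp
            | some s2 =>
              have hass : a + (ad.getD u 0 + su) + s2 = a + (ad.getD u 0 + su + s2) := by ring
              simp only [hass]

-- the two top-level loops agree inside Pre_ (F' = seed fuel of B, F'+1 = fuel of A, both above N)
theorem loop_eq (d : PySem.Dict Int Int) (ad : PySem.Dict Int Int) (N F' : Nat)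
    (hNF : N ≤ F') (hP : ∀ c ∈ d.keys, exitsD d N c = true) (hnd : d.keys.Nodup) :
    ∀ ks, (∀ c ∈ ks, c ∈ d.keys) → ∀ m,
    loopA (buildUpA d) ad (F' + 1) ks m = loopB (buildUpA d) ad F' ks m := by
  intro ks
  induction ks with
  | nil => intro _ m; rw [loopA, loopB]
  | cons c t ih =>
    intro hsub m
    rw [loopA, loopB]
    by_cases hc : m.contains c = true
    · rw [if_pos hc, if_pos hc]
      exact ih (fun x hx => hsub x (by simp [hx])) m
    · rw [if_neg hc, if_neg hc]
      have hsome := calcA_some d ad N hP hnd (F' + 1) c m (hsub c (by simp))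
        (fun h => absurd h (by omega))
      have hget : m.get? c = none := by
        have hh := PySem.Dict.contains_eq_isSome_get? m c
        cases h : m.get? c with
        | some v => rw [h] at hh; simp at hh; exact absurd hh hc
        | none => rfl
      rw [runB_frame (buildUpA d) ad F' ((buildUpA d).getD c []) c [] 0 m]
      rw [calcA_succ _ _ _ _ _ hget] at hsome ⊢
      rcases hr : calcAUps (buildUpA d) ad F' ((buildUpA d).getD c []) m with ⟨m', r⟩
      rw [hr] at hsome
      cases r with
      | none => simp at hsome
      | some s =>
        simp only [Int.zero_add]
        exact ih (fun x hx => hsub x (by simp [hx])) _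

-- ===== VERDICT (by name: the statement is the Claim_ definition above) =====
theorem calculate_drainage_area_spec : Claim_equal_calculate_drainage_area := by
  intro nd ad _hdom hpre
  unfold Spec_calculate_drainage_area calculate_drainage_area calculate_drainage_area_alt
  dsimp only
  have hP : ∀ c ∈ (PySem.Dict.ofList nd).keys,
      exitsD (PySem.Dict.ofList nd) ((PySem.Dict.ofList nd).keys.length + 1) c = true := by
    intro c hc
    unfold Pre_calculate_drainage_area at hpre
    rw [List.all_eq_true] at hpre
    simpa using hpre c hc
  have hnd := PySem.Dict.nodup_keys_ofList (κ := Int) (ν := Int) nd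
  rw [← buildUp_eq]
  have h2 : (PySem.Dict.ofList nd).keys.length + 2 = ((PySem.Dict.ofList nd).keys.length + 1) + 1 := rfl
  rw [h2, loop_eq (PySem.Dict.ofList nd) (PySem.Dict.ofList ad)
    ((PySem.Dict.ofList nd).keys.length + 1) ((PySem.Dict.ofList nd).keys.length + 1)
    (le_refl _) hP hnd _ (fun c hc => hc)]
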